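-- pv_equiv track=rewrite | github.com/SpiritBlues7/AdventOfCode-2023 | day12.py | check_if_satisfies_text
-- ===== SOURCE A (Python) =====
-- def check_if_satisfies_text(combo, required):
--     springs = combo.split(".")
--     i = 0
--     for spring in springs:
--         if spring == "":
--             continue
--         if i >= len(required):
--             return False
--         if len(spring) != required[i]:
--             return False
--         i += 1
--     if i != len(required):
--         return False
--     return True
-- ===== SOURCE B (Python) =====
-- def check_if_satisfies_text(combo, required):
--     s = "." + combo + "."
--     starts = [i for i, (a, b) in enumerate(zip(s, s[1:])) if a == "." and b != "."]
--     ends = [i for i, (a, b) in enumerate(zip(s, s[1:])) if a != "." and b == "."]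
--     return [e - b for b, e in zip(starts, ends)] == list(required)
-- ===== Notes on version B (the rewrite author's own statement) =====
-- stated objective: alternative
-- what changed: Replaces A's split-on-dots plus indexed walk with guards by boundary detection on a sentinel-padded string: it scans adjacent character pairs to collect group start and end positions, zips them, and compares the positional differences with required in one equality.
import Mathlib
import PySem

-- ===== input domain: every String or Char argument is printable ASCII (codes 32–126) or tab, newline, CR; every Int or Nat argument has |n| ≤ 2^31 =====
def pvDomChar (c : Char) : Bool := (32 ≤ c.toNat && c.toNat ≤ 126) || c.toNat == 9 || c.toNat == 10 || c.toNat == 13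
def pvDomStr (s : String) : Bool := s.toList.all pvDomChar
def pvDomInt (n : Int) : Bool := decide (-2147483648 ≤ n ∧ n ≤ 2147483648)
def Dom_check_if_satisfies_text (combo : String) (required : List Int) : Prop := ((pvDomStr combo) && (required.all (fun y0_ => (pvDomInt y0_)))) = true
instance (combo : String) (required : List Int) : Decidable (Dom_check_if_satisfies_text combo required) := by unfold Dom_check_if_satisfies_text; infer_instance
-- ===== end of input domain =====

-- B replaces A's split-and-walk (split on '.', indexed comparison of each group length)
-- by boundary detection on a sentinel-padded string: it collects the positions of
-- group starts and group ends from adjacent character pairs and compares the list of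
-- positional differences with required in one equality (objective: alternative).

-- ===== PORT A =====
-- the 'for spring in springs' loop with its running index i; early 'return False' = false
def pvA_loop (springs : List String) (required : List Int) (i : Nat) : Bool :=
  match springs with
  | [] => decide ((i : Int) = PySem.List.len required)   -- 'if i != len(required): return False / return True'
  | spring :: rest =>
    if spring = "" then pvA_loop rest required i
    else if (i : Int) ≥ PySem.List.len required then false
    else if (PySem.Str.len spring : Int) ≠ PySem.List.pyGetD required (i : Int) 0 then false
    else pvA_loop rest required (i + 1)

def check_if_satisfies_text (combo : String) (required : List Int) : Bool :=
  pvA_loop (((PySem.Str.split? combo ".").getD [])) required 0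

-- ===== PORT B =====
def check_if_satisfies_text_alt (combo : String) (required : List Int) : Bool :=
  let s := "." ++ combo ++ "."                                   -- s = "." + combo + "."
  let cs := s.toList
  let pairs := cs.zip (PySem.List.slice cs (some 1) none)        -- zip(s, s[1:])
  let starts := ((PySem.List.enumerate pairs).filter
      (fun x => x.2.1 == '.' && x.2.2 != '.')).map (fun x => x.1)
  let ends := ((PySem.List.enumerate pairs).filter
      (fun x => x.2.1 != '.' && x.2.2 == '.')).map (fun x => x.1)
  decide (((starts.zip ends).map (fun p => p.2 - p.1)) = required)

-- ===== PRECONDITION & SPEC =====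
def Spec_check_if_satisfies_text (combo : String) (required : List Int) (out : Bool) : Prop := out = check_if_satisfies_text_alt combo required
instance (combo : String) (required : List Int) (out : Bool) : Decidable (Spec_check_if_satisfies_text combo required out) := by unfold Spec_check_if_satisfies_text; infer_instance

-- ===== CLAIM (what is proved, stated in full; the proofs are below) =====
def Claim_equal_check_if_satisfies_text : Prop := ∀ (combo : String) (required : List Int), Dom_check_if_satisfies_text combo required → Spec_check_if_satisfies_text combo required (check_if_satisfies_text combo required)

-- ===== LEMMAS AND PROOFS =====

-- common spec: lengths of the maximal non-'.' runs, with n = length of the run in progress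
def pvAddRuns (n : Nat) (l : List Char) : List Int :=
  match l with
  | [] => if n = 0 then [] else [(n : Int)]
  | c :: rest =>
    if c = '.' then (if n = 0 then [] else [(n : Int)]) ++ pvAddRuns 0 rest
    else pvAddRuns (n + 1) rest

-- split on '.' as a plain structural recursion (cur = current piece)
def pvSplitDot (cur : List Char) (l : List Char) : List (List Char) :=
  match l with
  | [] => [cur]
  | c :: rest => if c = '.' then cur :: pvSplitDot [] rest else pvSplitDot (cur ++ [c]) rest

-- the adjacent pairs of p :: t ++ ['.']
def pvAdj (p : Char) (t : List Char) : List (Char × Char) :=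
  match t with
  | [] => [(p, '.')]
  | c :: rest => (p, c) :: pvAdj c rest

def pvS (p : Char) (t : List Char) (s : Int) : List Int :=
  ((PySem.List.enumerate (pvAdj p t) s).filter (fun x => x.2.1 == '.' && x.2.2 != '.')).map (fun x => x.1)
def pvE (p : Char) (t : List Char) (s : Int) : List Int :=
  ((PySem.List.enumerate (pvAdj p t) s).filter (fun x => x.2.1 != '.' && x.2.2 == '.')).map (fun x => x.1)

theorem pvGo_eq (fuel : Nat) (l cur : List Char) (acc : List (List Char)) (h : l.length ≤ fuel) :
    PySem.Chars.splitOn.go ['.'] fuel l cur acc = acc.reverse ++ pvSplitDot cur.reverse l := by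
  induction fuel generalizing l cur acc with
  | zero =>
    have : l = [] := by cases l <;> simp_all
    subst this
    simp [PySem.Chars.splitOn.go, pvSplitDot]
  | succ fuel ih =>
    cases l with
    | nil => simp [PySem.Chars.splitOn.go, pvSplitDot]
    | cons c rest =>
      by_cases hc : c = '.'
      · subst hc
        rw [show PySem.Chars.splitOn.go ['.'] (fuel+1) ('.'::rest) cur acc
              = PySem.Chars.splitOn.go ['.'] fuel rest [] (cur.reverse :: acc) by
            simp [PySem.Chars.splitOn.go, List.isPrefixOf]]
        rw [ih rest [] (cur.reverse :: acc) (by simpa using Nat.le_of_succ_le_succ h)]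
        simp [pvSplitDot]
      · rw [show PySem.Chars.splitOn.go ['.'] (fuel+1) (c::rest) cur acc
              = PySem.Chars.splitOn.go ['.'] fuel rest (c :: cur) acc by
            simp [PySem.Chars.splitOn.go, List.isPrefixOf, Ne.symm hc]]
        rw [ih rest (c :: cur) acc (by simpa using Nat.le_of_succ_le_succ h)]
        simp [pvSplitDot, hc]

theorem pvSplitOn_eq (t : List Char) :
    PySem.Chars.splitOn t ['.'] = pvSplitDot [] t := by
  unfold PySem.Chars.splitOn
  simpa using pvGo_eq (t.length + 1) t [] [] (by omega)

theorem pvSplitDot_lens (l : List Char) (cur : List Char) :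
    ((pvSplitDot cur l).filter (fun g => g ≠ [])).map (fun g => (g.length : Int))
      = pvAddRuns cur.length l := by
  induction l generalizing cur with
  | nil =>
    by_cases hcur : cur = [] <;> simp [pvSplitDot, pvAddRuns, hcur, List.length_eq_zero_iff]
  | cons c rest ih =>
    by_cases hc : c = '.'
    · subst hc
      by_cases hcur : cur = [] <;>
        · simp [pvSplitDot, pvAddRuns, hcur, List.length_eq_zero_iff]
          simpa using ih []
    · simp only [pvSplitDot, pvAddRuns, if_neg hc]
      simpa using ih (cur ++ [c])

-- loop invariant for A: from index i (≤ len), A's loop accepts iff the remaining group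
-- lengths equal required.drop i
theorem pvA_loop_eq (springs : List String) (required : List Int) (i : Nat)
    (hi : i ≤ required.length) :
    pvA_loop springs required i
      = decide (((springs.filter (fun g => g ≠ "")).map (fun g => (PySem.Str.len g : Int)))
                  = required.drop i) := by
  induction springs generalizing i with
  | nil =>
    simp only [pvA_loop, PySem.List.len_eq, List.filter_nil, List.map_nil]
    rw [decide_eq_decide]
    constructor
    · intro h
      have hi' : i = required.length := by exact_mod_cast h
      simp [hi']
    · intro h
      have hle := (List.drop_eq_nil_iff).mp h.symm
      have : i = required.length := le_antisymm hi hle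
      exact_mod_cast this
  | cons s rest ih =>
    by_cases hs : s = ""
    · simp [pvA_loop, hs, ih i hi]
    · simp only [pvA_loop, hs, if_false, PySem.List.len_eq]
      rcases Nat.lt_or_ge i required.length with h | h
      · have hlt : ¬ ((i : Int) ≥ (required.length : Int)) := by exact_mod_cast Nat.not_le.mpr h
        have hget : PySem.List.pyGetD required (i : Int) 0 = required[i] := by
          rw [PySem.List.pyGetD_natCast, List.getD_eq_getElem required 0 h]
        have hdrop : required.drop i = required[i] :: required.drop (i + 1) :=
          List.drop_eq_getElem_cons h
        rw [if_neg hlt, hget]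
        by_cases heq : (PySem.Str.len s : Int) = required[i]
        · rw [if_neg (by simpa using heq), ih (i + 1) h, decide_eq_decide]
          rw [hdrop, List.filter_cons_of_pos (by simp [hs]), List.map_cons,
            List.cons_eq_cons]
          have hh : ((s.length : Nat) : Int) = required[i] := by simpa using heq
          simp [hh]
        · rw [if_pos heq, eq_comm, decide_eq_false_iff_not]
          rw [hdrop, List.filter_cons_of_pos (by simp [hs]), List.map_cons,
            List.cons_eq_cons]
          exact fun hc => heq (by simpa using hc.1)
      · have hi' : i = required.length := le_antisymm hi h
        rw [if_pos (by exact_mod_cast h), eq_comm, decide_eq_false_iff_not, hi',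
          List.drop_length]
        simp [hs]

theorem pvOfList_filter_map (parts : List (List Char)) :
    (((parts.map String.ofList).filter (fun g => g ≠ "")).map (fun g => (PySem.Str.len g : Int)))
      = ((parts.filter (fun g => g ≠ [])).map (fun g => (g.length : Int))) := by
  induction parts with
  | nil => simp
  | cons p rest ih =>
    by_cases hp : p = []
    · simp [hp]
      simpa using ih
    · have h1 : String.ofList p ≠ "" := by
        intro hcon
        exact hp (by simpa using congrArg String.toList hcon)
      simp [hp, h1, PySem.Str.len]
      simpa using ih

-- A computes the run lengths of combo
theorem pvA_runs (combo : String) (required : List Int) :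
    check_if_satisfies_text combo required = decide (pvAddRuns 0 combo.toList = required) := by
  unfold check_if_satisfies_text
  have hsplit : (PySem.Str.split? combo ".").getD []
      = (PySem.Chars.splitOn combo.toList ['.']).map String.ofList := by
    simp [PySem.Str.split?, PySem.Chars.split?]
  rw [hsplit, pvA_loop_eq _ _ 0 (Nat.zero_le _), List.drop_zero, pvOfList_filter_map,
    pvSplitOn_eq, pvSplitDot_lens]
  rfl

-- the adjacent pairs of the padded string
theorem pvZip_adj (p : Char) (t : List Char) :
    (p :: (t ++ ['.'])).zip (t ++ ['.']) = pvAdj p t := by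
  induction t generalizing p with
  | nil => simp [pvAdj]
  | cons c rest ih => simp [pvAdj, ih c]

-- main invariant: starts and ends pair up into the run lengths
theorem pvSE_eq (t : List Char) :
    (∀ s : Int, ((pvS '.' t s).zip (pvE '.' t s)).map (fun p => p.2 - p.1) = pvAddRuns 0 t)
    ∧ (∀ (p : Char) (s b : Int), p ≠ '.' → b < s →
        (((b :: pvS p t s).zip (pvE p t s)).map (fun p => p.2 - p.1)
          = pvAddRuns (s - b).toNat t)) := by
  induction t with
  | nil =>
    constructor
    · intro s
      simp [pvS, pvE, pvAdj, pvAddRuns, PySem.List.enumerate_cons, PySem.List.enumerate_nil]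
    · intro p s b hp hb
      have hn : ((s - b).toNat : Int) = s - b := by omega
      have hn0 : (s - b).toNat ≠ 0 := by omega
      simp [pvS, pvE, pvAdj, PySem.List.enumerate_cons, PySem.List.enumerate_nil, hp,
        pvAddRuns, hn, hn0]
  | cons c rest ih =>
    constructor
    · intro s
      by_cases hc : c = '.'
      · subst hc
        simpa [pvS, pvE, pvAdj, PySem.List.enumerate_cons, pvAddRuns]
          using ih.1 (s + 1)
      · have := ih.2 c (s + 1) s hc (by omega)
        have hone : ((s + 1) - s).toNat = 1 := by omega
        rw [hone] at this
        simpa [pvS, pvE, pvAdj, PySem.List.enumerate_cons, pvAddRuns, hc] using this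
    · intro p s b hp hb
      by_cases hc : c = '.'
      · subst hc
        have hn : ((s - b).toNat : Int) = s - b := by omega
        have hn0 : (s - b).toNat ≠ 0 := by omega
        simpa [pvS, pvE, pvAdj, PySem.List.enumerate_cons, pvAddRuns, hp, hn, hn0]
          using ih.1 (s + 1)
      · have := ih.2 c (s + 1) b hc (by omega)
        have hrw : ((s + 1) - b).toNat = (s - b).toNat + 1 := by omega
        rw [hrw] at this
        simpa [pvS, pvE, pvAdj, PySem.List.enumerate_cons, pvAddRuns, hc, hp] using this

-- B computes the run lengths of combo
theorem pvB_runs (combo : String) (required : List Int) :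
    check_if_satisfies_text_alt combo required = decide (pvAddRuns 0 combo.toList = required) := by
  unfold check_if_satisfies_text_alt
  have hcs : ("." ++ combo ++ ".").toList = '.' :: (combo.toList ++ ['.']) := by
    simp
  have hslice : PySem.List.slice ('.' :: (combo.toList ++ ['.'])) (some 1) none
      = combo.toList ++ ['.'] := by
    simpa using PySem.List.slice_from ('.' :: (combo.toList ++ ['.'])) (a := 1) (by norm_num)
  simp only [hcs, hslice, pvZip_adj '.' combo.toList]
  rw [decide_eq_decide]
  constructor
  · intro h
    rw [← (pvSE_eq combo.toList).1 0]
    simpa [pvS, pvE] using h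
  · intro h
    have := (pvSE_eq combo.toList).1 0
    rw [h] at this
    simpa [pvS, pvE] using this

-- ===== VERDICT (by name: the statement is the Claim_ definition above) =====
theorem check_if_satisfies_text_spec : Claim_equal_check_if_satisfies_text := by
  intro combo required _
  unfold Spec_check_if_satisfies_text
  rw [pvA_runs, pvB_runs]
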